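-- pv_equiv track=rewrite | github.com/DavidPerry12/NaturalLanguageDataExplorer | nfl_explorer.py | parse_scatter_query
-- ===== SOURCE A (Python) =====
-- KEYWORD_MAP = {
--     "points allowed":     "points_allowed",
--     "points against":     "points_allowed",
--     "gave up":            "points_allowed",
--     "pass yards allowed": "pass_yards_allowed",
--     "passing defense":    "pass_yards_allowed",
--     "rush yards allowed": "rush_yards_allowed",
--     "rushing defense":    "rush_yards_allowed",
--     "yards allowed":      "total_yards_allowed",
--     "total defense":      "total_yards_allowed",
--     "passing yards":      "pass_yards_off",
--     "pass yards":         "pass_yards_off",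
--     "passing offense":    "pass_yards_off",
--     "rushing yards":      "rush_yards_off",
--     "rush yards":         "rush_yards_off",
--     "rushing offense":    "rush_yards_off",
--     "total yards":        "total_yards_off",
--     "total offense":      "total_yards_off",
--     "pass tds":           "pass_tds",
--     "passing touchdowns": "pass_tds",
--     "rush tds":           "rush_tds",
--     "rushing touchdowns": "rush_tds",
--     "interceptions thrown": "interceptions_thrown",
--     "interceptions":      "interceptions_thrown",
--     "turnovers":          "turnovers_off",
--     "takeaways":          "takeaways",
--     "turnovers forced":   "takeaways",
--     "scoring percentage": "score_pct_off",
--     "expected points":    "exp_pts_off",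
--     "points scored":      "points_for",
--     "points for":         "points_for",
--     "scored":             "points_for",
--     "scoring":            "points_for",
--     "defense":            "total_yards_allowed",
--     "offense":            "total_yards_off",
--     "yards":              "total_yards_off",
--     "points":             "points_for",
-- }
--
-- def find_column(text):
--     # Loop through the keyword map and return the first column that matches
--     for keyword in sorted(KEYWORD_MAP.keys(), key=len, reverse=True):
--         if keyword in text:
--             return KEYWORD_MAP[keyword]
--     return None
--
-- def parse_scatter_query(query):
--
--     split_words = ["vs", "versus", "compare", "and"]
--     parts = [query]
--     for word in split_words:
--         if word in query:
--             parts = query.split(word, 1)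
--             break
--
--     col_x = find_column(parts[0])
--     col_y = find_column(parts[1]) if len(parts) > 1 else None
--
--     # Fall back to default columns on failure
--     if col_x is None:
--         col_x = "points_for"
--     if col_y is None:
--         col_y = "total_yards_off"
--
--     return {"chart_type": "scatter", "col_x": col_x, "col_y": col_y}
-- ===== SOURCE B (Python) =====
-- KEYWORD_MAP = {
--     "points allowed":     "points_allowed",
--     "points against":     "points_allowed",
--     "gave up":            "points_allowed",
--     "pass yards allowed": "pass_yards_allowed",
--     "passing defense":    "pass_yards_allowed",
--     "rush yards allowed": "rush_yards_allowed",
--     "rushing defense":    "rush_yards_allowed",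
--     "yards allowed":      "total_yards_allowed",
--     "total defense":      "total_yards_allowed",
--     "passing yards":      "pass_yards_off",
--     "pass yards":         "pass_yards_off",
--     "passing offense":    "pass_yards_off",
--     "rushing yards":      "rush_yards_off",
--     "rush yards":         "rush_yards_off",
--     "rushing offense":    "rush_yards_off",
--     "total yards":        "total_yards_off",
--     "total offense":      "total_yards_off",
--     "pass tds":           "pass_tds",
--     "passing touchdowns": "pass_tds",
--     "rush tds":           "rush_tds",
--     "rushing touchdowns": "rush_tds",
--     "interceptions thrown": "interceptions_thrown",
--     "interceptions":      "interceptions_thrown",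
--     "turnovers":          "turnovers_off",
--     "takeaways":          "takeaways",
--     "turnovers forced":   "takeaways",
--     "scoring percentage": "score_pct_off",
--     "expected points":    "exp_pts_off",
--     "points scored":      "points_for",
--     "points for":         "points_for",
--     "scored":             "points_for",
--     "scoring":            "points_for",
--     "defense":            "total_yards_allowed",
--     "offense":            "total_yards_off",
--     "yards":              "total_yards_off",
--     "points":             "points_for",
-- }
--
--
-- def find_column(text):
--     # Single pass: keep the longest matching keyword; strict '>' keeps the
--     # first-inserted keyword among equal lengths.
--     best_col = None
--     best_len = -1
--     for keyword, column in KEYWORD_MAP.items():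
--         if keyword in text and len(keyword) > best_len:
--             best_col = column
--             best_len = len(keyword)
--     return best_col
--
--
-- def parse_scatter_query(query):
--     parts = next((query.split(w, 1) for w in ("vs", "versus", "compare", "and")
--                   if w in query), [query])
--     col_x = find_column(parts[0]) or "points_for"
--     col_y = (find_column(parts[1]) if len(parts) > 1 else None) or "total_yards_off"
--     return {"chart_type": "scatter", "col_x": col_x, "col_y": col_y}
-- ===== Notes on version B (the rewrite author's own statement) =====
-- stated objective: alternative
-- what changed: find_column no longer sorts all keywords by length on every call and scans for the first match; B makes a single pass over KEYWORD_MAP tracking the longest matching keyword (strict '>' preserves the stable sort's insertion-order tie-break), and the split-word loop becomes a first-match expression.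
import Mathlib
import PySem

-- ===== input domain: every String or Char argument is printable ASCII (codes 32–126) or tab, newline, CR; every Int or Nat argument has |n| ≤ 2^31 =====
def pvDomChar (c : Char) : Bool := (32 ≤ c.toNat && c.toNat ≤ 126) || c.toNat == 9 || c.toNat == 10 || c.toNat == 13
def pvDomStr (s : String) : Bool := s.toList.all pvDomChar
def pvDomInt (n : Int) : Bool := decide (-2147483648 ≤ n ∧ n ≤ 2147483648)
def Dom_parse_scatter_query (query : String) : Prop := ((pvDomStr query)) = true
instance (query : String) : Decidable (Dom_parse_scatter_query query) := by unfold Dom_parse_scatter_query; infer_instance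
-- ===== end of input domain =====

-- B replaces A's sort-all-keywords-then-take-first-match keyword selection by a single pass over
-- KEYWORD_MAP that tracks the longest matching keyword (strict '>' keeps insertion-order tie-break);
-- objective: alternative (no sort per call), same return value everywhere.

-- ===== PORT A =====
-- module constant (shared data of both Python versions)
def KEYWORD_MAP : PySem.Dict String String := PySem.Dict.mk [
  ("points allowed", "points_allowed"),
  ("points against", "points_allowed"),
  ("gave up", "points_allowed"),
  ("pass yards allowed", "pass_yards_allowed"),
  ("passing defense", "pass_yards_allowed"),
  ("rush yards allowed", "rush_yards_allowed"),
  ("rushing defense", "rush_yards_allowed"),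
  ("yards allowed", "total_yards_allowed"),
  ("total defense", "total_yards_allowed"),
  ("passing yards", "pass_yards_off"),
  ("pass yards", "pass_yards_off"),
  ("passing offense", "pass_yards_off"),
  ("rushing yards", "rush_yards_off"),
  ("rush yards", "rush_yards_off"),
  ("rushing offense", "rush_yards_off"),
  ("total yards", "total_yards_off"),
  ("total offense", "total_yards_off"),
  ("pass tds", "pass_tds"),
  ("passing touchdowns", "pass_tds"),
  ("rush tds", "rush_tds"),
  ("rushing touchdowns", "rush_tds"),
  ("interceptions thrown", "interceptions_thrown"),
  ("interceptions", "interceptions_thrown"),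
  ("turnovers", "turnovers_off"),
  ("takeaways", "takeaways"),
  ("turnovers forced", "takeaways"),
  ("scoring percentage", "score_pct_off"),
  ("expected points", "exp_pts_off"),
  ("points scored", "points_for"),
  ("points for", "points_for"),
  ("scored", "points_for"),
  ("scoring", "points_for"),
  ("defense", "total_yards_allowed"),
  ("offense", "total_yards_off"),
  ("yards", "total_yards_off"),
  ("points", "points_for")]

-- A's 'for keyword in …: if keyword in text: return KEYWORD_MAP[keyword]' (get? = some, keys come from the map)
def findLoopA : List String → String → Option String
  | [], _ => none
  | k :: rest, text =>
    if PySem.Str.isIn k text then PySem.Dict.get? KEYWORD_MAP k else findLoopA rest text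

def find_columnA (text : String) : Option String :=
  findLoopA (PySem.List.sorted (PySem.Dict.keys KEYWORD_MAP) (fun k => PySem.Str.len k) true) text

-- A's 'for word in split_words: if word in query: parts = query.split(word, 1); break'
-- (.getD [query] only guards splitMax?'s none case, sep = "", unreachable for these literals)
def splitLoopA : List String → String → List String
  | [], query => [query]
  | w :: ws, query =>
    if PySem.Str.isIn w query then (PySem.Str.splitMax? query w 1).getD [query]
    else splitLoopA ws query

def parse_scatter_query (query : String) : List (String × String) :=
  let parts := splitLoopA ["vs", "versus", "compare", "and"] query
  let col_x := find_columnA ((PySem.List.pyGet? parts 0).getD "")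
  let col_y := if parts.length > 1 then find_columnA ((PySem.List.pyGet? parts 1).getD "") else none
  let col_x := col_x.getD "points_for"
  let col_y := col_y.getD "total_yards_off"
  [("chart_type", "scatter"), ("col_x", col_x), ("col_y", col_y)]

-- ===== PORT B =====
-- single pass tracking (best_col, best_len), strict '>' (Source B's find_column)
def find_columnB (text : String) : Option String :=
  ((PySem.Dict.items KEYWORD_MAP).foldl
    (fun (st : Option String × Int) p =>
      if PySem.Str.isIn p.1 text && decide (PySem.Str.len p.1 > st.2)
      then (some p.2, PySem.Str.len p.1) else st)
    (none, -1)).1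

def parse_scatter_query_alt (query : String) : List (String × String) :=
  let parts := (((["vs", "versus", "compare", "and"].find? (fun w => PySem.Str.isIn w query))).bind
      (fun w => PySem.Str.splitMax? query w 1)).getD [query]
  let col_x := (find_columnB ((PySem.List.pyGet? parts 0).getD "")).getD "points_for"
  let col_y := (if parts.length > 1 then find_columnB ((PySem.List.pyGet? parts 1).getD "") else none).getD "total_yards_off"
  [("chart_type", "scatter"), ("col_x", col_x), ("col_y", col_y)]

-- ===== PRECONDITION & SPEC =====
def Spec_parse_scatter_query (query : String) (out : List (String × String)) : Prop := out = parse_scatter_query_alt query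
instance (query : String) (out : List (String × String)) : Decidable (Spec_parse_scatter_query query out) := by unfold Spec_parse_scatter_query; infer_instance

-- ===== CLAIM (what is proved, stated in full; the proofs are below) =====
def Claim_equal_parse_scatter_query : Prop := ∀ (query : String), Dom_parse_scatter_query query → Spec_parse_scatter_query query (parse_scatter_query query)

-- ===== LEMMAS AND PROOFS =====

-- KEYWORD_MAP's items stably sorted by descending keyword length (checked below by kernel evaluation)
def SORTED_PAIRS : List (String × String) := [
  ("interceptions thrown", "interceptions_thrown"),
  ("pass yards allowed", "pass_yards_allowed"),
  ("rush yards allowed", "rush_yards_allowed"),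
  ("passing touchdowns", "pass_tds"),
  ("rushing touchdowns", "rush_tds"),
  ("scoring percentage", "score_pct_off"),
  ("turnovers forced", "takeaways"),
  ("passing defense", "pass_yards_allowed"),
  ("rushing defense", "rush_yards_allowed"),
  ("passing offense", "pass_yards_off"),
  ("rushing offense", "rush_yards_off"),
  ("expected points", "exp_pts_off"),
  ("points allowed", "points_allowed"),
  ("points against", "points_allowed"),
  ("yards allowed", "total_yards_allowed"),
  ("total defense", "total_yards_allowed"),
  ("passing yards", "pass_yards_off"),
  ("rushing yards", "rush_yards_off"),
  ("total offense", "total_yards_off"),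
  ("interceptions", "interceptions_thrown"),
  ("points scored", "points_for"),
  ("total yards", "total_yards_off"),
  ("pass yards", "pass_yards_off"),
  ("rush yards", "rush_yards_off"),
  ("points for", "points_for"),
  ("turnovers", "turnovers_off"),
  ("takeaways", "takeaways"),
  ("pass tds", "pass_tds"),
  ("rush tds", "rush_tds"),
  ("gave up", "points_allowed"),
  ("scoring", "points_for"),
  ("defense", "total_yards_allowed"),
  ("offense", "total_yards_off"),
  ("scored", "points_for"),
  ("points", "points_for"),
  ("yards", "total_yards_off")]

-- the result A's sorted-first-match loop computes, as a function of an already-sorted pair list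
def pvF (text : String) (S : List (String × String)) : Option String × Int :=
  match S.find? (fun p => PySem.Str.isIn p.1 text) with
  | none => (none, -1)
  | some p => (some p.2, PySem.Str.len p.1)

-- the comparison PySem.List.sorted (key = len of fst, reverse) inserts with
def pvBef (a b : String × String) : Bool := decide (PySem.Str.len b.1 < PySem.Str.len a.1)

theorem pvLen_nonneg (s : String) : (0 : Int) ≤ PySem.Str.len s := by
  simp [PySem.Str.len_eq]

theorem pvInsert_nil (x : String × String) : PySem.List.insertBy pvBef x [] = [x] := rfl

theorem pvInsert_cons (x y : String × String) (ys : List (String × String)) :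
    PySem.List.insertBy pvBef x (y :: ys)
    = if pvBef x y then x :: y :: ys else y :: PySem.List.insertBy pvBef x ys := rfl

theorem pvF_nil (text : String) : pvF text [] = (none, -1) := rfl

theorem pvF_cons_pos (text : String) {q : String × String} (S : List (String × String))
    (hq : PySem.Str.isIn q.1 text = true) : pvF text (q :: S) = (some q.2, PySem.Str.len q.1) := by
  unfold pvF
  rw [List.find?_cons_of_pos (p := fun p : String × String => PySem.Str.isIn p.1 text) hq]

theorem pvF_cons_neg (text : String) {q : String × String} (S : List (String × String))
    (hq : ¬ PySem.Str.isIn q.1 text = true) : pvF text (q :: S) = pvF text S := by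
  unfold pvF
  rw [List.find?_cons_of_neg (p := fun p : String × String => PySem.Str.isIn p.1 text) hq]

theorem pvF_snd (text : String) (S : List (String × String)) :
    (pvF text S).2 = -1 ∨ ∃ r ∈ S, (pvF text S).2 = PySem.Str.len r.1 := by
  unfold pvF
  cases h : S.find? (fun p => PySem.Str.isIn p.1 text) with
  | none => exact Or.inl rfl
  | some p => exact Or.inr ⟨p, List.mem_of_find?_eq_some h, rfl⟩

theorem pvStep_insertBy (text : String) (p : String × String) (S : List (String × String))
    (hS : S.Pairwise (fun a b => PySem.Str.len b.1 ≤ PySem.Str.len a.1)) :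
    (if PySem.Str.isIn p.1 text && decide (PySem.Str.len p.1 > (pvF text S).2)
     then (some p.2, PySem.Str.len p.1) else pvF text S)
    = pvF text (PySem.List.insertBy pvBef p S) := by
  induction S with
  | nil =>
    rw [pvInsert_nil, pvF_nil]
    by_cases hp : PySem.Str.isIn p.1 text
    · rw [pvF_cons_pos text [] hp, if_pos]
      have h0 := pvLen_nonneg p.1
      simp only [Bool.and_eq_true, decide_eq_true_eq, gt_iff_lt, hp, true_and]
      omega
    · rw [pvF_cons_neg text [] hp, pvF_nil, if_neg (fun hc => hp ((Bool.and_eq_true _ _).mp hc).1)]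
  | cons q T ih =>
    rw [pvInsert_cons]
    have hq_pair := List.pairwise_cons.mp hS
    by_cases hlt : pvBef p q = true
    · rw [if_pos hlt]
      have hlt' : PySem.Str.len q.1 < PySem.Str.len p.1 := by
        simpa [pvBef] using hlt
      by_cases hp : PySem.Str.isIn p.1 text
      · have hgt : (pvF text (q :: T)).2 < PySem.Str.len p.1 := by
          rcases pvF_snd text (q :: T) with h1 | ⟨r, hr, h2⟩
          · rw [h1]; have := pvLen_nonneg p.1; omega
          · rw [h2]
            rcases List.mem_cons.mp hr with rfl | hrT
            · exact hlt'
            · exact lt_of_le_of_lt (hq_pair.1 r hrT) hlt'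
        rw [pvF_cons_pos text (q :: T) hp, if_pos]
        simp only [Bool.and_eq_true, decide_eq_true_eq, gt_iff_lt, hp, true_and]
        omega
      · rw [pvF_cons_neg text (q :: T) hp, if_neg (fun hc => hp ((Bool.and_eq_true _ _).mp hc).1)]
    · rw [if_neg hlt]
      have hle : PySem.Str.len p.1 ≤ PySem.Str.len q.1 := by
        have : ¬ PySem.Str.len q.1 < PySem.Str.len p.1 := by simpa [pvBef] using hlt
        omega
      by_cases hq : PySem.Str.isIn q.1 text
      · rw [pvF_cons_pos text T hq, pvF_cons_pos text (PySem.List.insertBy pvBef p T) hq, if_neg]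
        simp only [Bool.and_eq_true, decide_eq_true_eq, gt_iff_lt, not_and]
        intro _
        omega
      · rw [pvF_cons_neg text T hq, pvF_cons_neg text (PySem.List.insertBy pvBef p T) hq]
        exact ih hq_pair.2

theorem pvFoldB (text : String) (M : List (String × String)) :
    M.foldl (fun (st : Option String × Int) p =>
        if PySem.Str.isIn p.1 text && decide (PySem.Str.len p.1 > st.2)
        then (some p.2, PySem.Str.len p.1) else st) (none, -1)
    = pvF text (PySem.List.sorted M (fun p => PySem.Str.len p.1) true) := by
  induction M using List.reverseRecOn with
  | nil => rfl
  | append_singleton M p ih =>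
    rw [List.foldl_append, List.foldl_cons, List.foldl_nil, ih]
    have hs : PySem.List.sorted (M ++ [p]) (fun p => PySem.Str.len p.1) true
        = PySem.List.insertBy pvBef p (PySem.List.sorted M (fun p => PySem.Str.len p.1) true) := by
      rw [PySem.List.sorted_rev_eq_foldl_insertBy (M ++ [p]), List.foldl_append, List.foldl_cons,
          List.foldl_nil, ← PySem.List.sorted_rev_eq_foldl_insertBy M]
      rfl
    rw [hs]
    exact pvStep_insertBy text p _ (PySem.List.sorted_pairwise_rev M _)

set_option maxRecDepth 8192 in
theorem pv_sortedK : PySem.List.sorted (PySem.Dict.keys KEYWORD_MAP) (fun k => PySem.Str.len k) true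
    = SORTED_PAIRS.map Prod.fst := by decide

set_option maxRecDepth 8192 in
theorem pv_sortedP : PySem.List.sorted (PySem.Dict.items KEYWORD_MAP) (fun p => PySem.Str.len p.1) true
    = SORTED_PAIRS := by decide

set_option maxRecDepth 8192 in
theorem pv_lookup : ∀ p ∈ SORTED_PAIRS, PySem.Dict.get? KEYWORD_MAP p.1 = some p.2 := by decide

theorem findLoopA_eq (text : String) : ∀ (Ps : List (String × String)),
    (∀ p ∈ Ps, PySem.Dict.get? KEYWORD_MAP p.1 = some p.2) →
    findLoopA (Ps.map Prod.fst) text = (Ps.find? (fun p => PySem.Str.isIn p.1 text)).map Prod.snd := by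
  intro Ps
  induction Ps with
  | nil => intro _; rfl
  | cons q T ih =>
    intro h
    by_cases hq : PySem.Str.isIn q.1 text
    · rw [List.map_cons, List.find?_cons_of_pos (p := fun p : String × String => PySem.Str.isIn p.1 text) hq]
      simp only [findLoopA, if_pos hq, Option.map_some]
      exact h q (by simp)
    · rw [List.map_cons, List.find?_cons_of_neg (p := fun p : String × String => PySem.Str.isIn p.1 text) hq]
      simp only [findLoopA, if_neg hq]
      exact ih (fun p hp => h p (by simp [hp]))

theorem find_column_eq (text : String) : find_columnA text = find_columnB text := by
  unfold find_columnA find_columnB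
  rw [pv_sortedK, findLoopA_eq text SORTED_PAIRS pv_lookup, pvFoldB, pv_sortedP]
  unfold pvF
  cases h : SORTED_PAIRS.find? (fun p => PySem.Str.isIn p.1 text) <;> rfl

theorem splitLoopA_eq (query : String) : ∀ (ws : List String),
    splitLoopA ws query
    = (((ws.find? (fun w => PySem.Str.isIn w query))).bind
        (fun w => PySem.Str.splitMax? query w 1)).getD [query] := by
  intro ws
  induction ws with
  | nil => rfl
  | cons w ws ih =>
    by_cases hw : PySem.Str.isIn w query
    · rw [List.find?_cons_of_pos (p := fun w : String => PySem.Str.isIn w query) hw]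
      simp only [splitLoopA, if_pos hw]
      rfl
    · rw [List.find?_cons_of_neg (p := fun w : String => PySem.Str.isIn w query) hw]
      simp only [splitLoopA, if_neg hw]
      exact ih

-- ===== VERDICT (by name: the statement is the Claim_ definition above) =====
theorem parse_scatter_query_spec : Claim_equal_parse_scatter_query := by
  intro query _
  unfold Spec_parse_scatter_query parse_scatter_query parse_scatter_query_alt
  simp only [splitLoopA_eq, find_column_eq]
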